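-- pv_equiv track=rewrite | github.com/tvdyb/sharp-tail | src/polymir/research/engine.py | _param_combinations
-- ===== SOURCE A (Python) =====
-- from typing import Any
--
-- def _param_combinations(grid: dict[str, list[Any]]) -> list[dict[str, Any]]:
--     """Generate all combinations from a parameter grid."""
--     if not grid:
--         return [{}]
--
--     keys = list(grid.keys())
--     values = list(grid.values())
--
--     combos = [{}]
--     for key, vals in zip(keys, values):
--         new_combos = []
--         for combo in combos:
--             for val in vals:
--                 new_combo = combo.copy()
--                 new_combo[key] = val
--                 new_combos.append(new_combo)
--         combos = new_combos
--
--     return combos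
-- ===== SOURCE B (Python) =====
-- from typing import Any
--
-- def _param_combinations(grid: dict[str, list[Any]]) -> list[dict[str, Any]]:
--     """Generate all combinations from a parameter grid, by recursion on the key list."""
--     items = list(grid.items())
--
--     def build(i: int) -> list[dict[str, Any]]:
--         if i == len(items):
--             return [{}]
--         key, vals = items[i]
--         tail = build(i + 1)
--         return [{key: val, **rest} for val in vals for rest in tail]
--
--     return build(0)
-- ===== Notes on version B (the rewrite author's own statement) =====
-- stated objective: alternative
-- what changed: Replaces the iterative rebuild-the-whole-list-per-key loop (combos re-extended key by key) with a recursion over the key list: the combinations of the remaining keys are computed once and each value of the first key is merged onto each of them, so the last key still varies fastest.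
import Mathlib
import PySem

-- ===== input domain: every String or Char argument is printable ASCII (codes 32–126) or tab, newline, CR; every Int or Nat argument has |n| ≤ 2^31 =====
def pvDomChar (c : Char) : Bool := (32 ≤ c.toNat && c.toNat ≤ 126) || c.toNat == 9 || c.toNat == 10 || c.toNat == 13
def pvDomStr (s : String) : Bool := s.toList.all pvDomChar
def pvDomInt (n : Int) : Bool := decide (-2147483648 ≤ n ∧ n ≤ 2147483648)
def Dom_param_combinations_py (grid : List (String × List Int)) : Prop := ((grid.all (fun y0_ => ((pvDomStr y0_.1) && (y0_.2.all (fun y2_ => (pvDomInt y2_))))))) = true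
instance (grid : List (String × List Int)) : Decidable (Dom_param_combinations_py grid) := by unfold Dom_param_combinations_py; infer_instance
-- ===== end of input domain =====

-- B replaces A's iterative rebuild-all-combos-per-key loop with a recursion over the key
-- list (tail computed once, first key's values merged onto it); same order, same cost.

-- Python dict assignment `d[key] = val` on a combo represented as its item list
def pvDictSet (c : List (String × Int)) (k : String) (v : Int) : List (String × Int) :=
  ((PySem.Dict.mk c).insert k v).items

-- ===== PORT A =====
def param_combinations_py (grid : List (String × List Int)) : List (List (String × Int)) :=
  if grid = [] then [[]]
  else
    grid.foldl
      (fun combos kv =>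
        combos.foldl
          (fun newCombos combo =>
            kv.2.foldl (fun newCombos val => newCombos ++ [pvDictSet combo kv.1 val]) newCombos)
          [])
      [[]]

-- ===== PORT B =====
-- build(i) of Source B, as structural recursion on the remaining items list
def pvBuild : List (String × List Int) → List (List (String × Int))
  | [] => [[]]
  | (key, vals) :: items =>
    let tail := pvBuild items
    vals.flatMap (fun val =>
      tail.map (fun rest => rest.foldl (fun d p => pvDictSet d p.1 p.2) [(key, val)]))

def param_combinations_py_alt (grid : List (String × List Int)) : List (List (String × Int)) :=
  pvBuild grid

-- ===== PRECONDITION & SPEC =====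
-- Pre_ requires the keys to be pairwise distinct: the Python argument is a dict, whose keys
-- are distinct by construction, so a duplicate-key association list represents no Python input.
def Pre_param_combinations_py (grid : List (String × List Int)) : Prop :=
  (grid.map Prod.fst).Nodup
instance (grid : List (String × List Int)) : Decidable (Pre_param_combinations_py grid) := by
  unfold Pre_param_combinations_py; infer_instance

def pvWitness_param_combinations_py : (List (String × List Int)) :=
  [("a", [1, 2]), ("b", [3])]

def Spec_param_combinations_py (grid : List (String × List Int)) (out : List (List (String × Int))) : Prop := out = param_combinations_py_alt grid
instance (grid : List (String × List Int)) (out : List (List (String × Int))) : Decidable (Spec_param_combinations_py grid out) := by unfold Spec_param_combinations_py; infer_instance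

-- ===== CLAIM (what is proved, stated in full; the proofs are below) =====
def Claim_equal_param_combinations_py : Prop := ∀ (grid : List (String × List Int)), Dom_param_combinations_py grid → Pre_param_combinations_py grid → Spec_param_combinations_py grid (param_combinations_py grid)

-- ===== LEMMAS AND PROOFS =====

-- plain Cartesian product of the grid as cons-lists (no dict semantics)
def pvCart : List (String × List Int) → List (List (String × Int))
  | [] => [[]]
  | (k, vs) :: t => vs.flatMap (fun v => (pvCart t).map (fun r => (k, v) :: r))

theorem pvDictSet_fresh (c : List (String × Int)) (k : String) (v : Int)
    (h : k ∉ c.map Prod.fst) : pvDictSet c k v = c ++ [(k, v)] := by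
  unfold pvDictSet
  rw [PySem.Dict.items_insert_of_not_contains]
  simp [PySem.Dict.contains_eq_decide_mem_keys, h]

theorem pvMerge_fresh (r d : List (String × Int))
    (hnd : (r.map Prod.fst).Nodup)
    (hfresh : ∀ x ∈ r.map Prod.fst, x ∉ d.map Prod.fst) :
    r.foldl (fun d p => pvDictSet d p.1 p.2) d = d ++ r := by
  induction r generalizing d with
  | nil => simp
  | cons p t ih =>
    obtain ⟨hp, hnd'⟩ := List.nodup_cons.mp (by simpa only [List.map_cons] using hnd)
    simp only [List.foldl_cons]
    rw [pvDictSet_fresh d p.1 p.2 (hfresh p.1 (by simp)), ih (d ++ [(p.1, p.2)]) hnd' ?_]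
    · simp
    · intro x hx
      simp only [List.map_append, List.map_cons, List.map_nil, List.mem_append,
        List.mem_singleton]
      rintro (h | rfl)
      · exact hfresh x (by simp [hx]) h
      · exact hp hx

theorem pvCart_keys (gs : List (String × List Int)) :
    ∀ r ∈ pvCart gs, r.map Prod.fst = gs.map Prod.fst := by
  induction gs with
  | nil => intro r hr; simp [pvCart] at hr; simp [hr]
  | cons g t ih =>
    intro r hr
    obtain ⟨k, vs⟩ := g
    simp only [pvCart, List.mem_flatMap, List.mem_map] at hr
    obtain ⟨v, _, s, hs, rfl⟩ := hr
    simp [ih s hs]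

theorem pvA_loop (gs : List (String × List Int)) (C : List (List (String × Int))) :
    gs.foldl
      (fun combos kv =>
        combos.foldl
          (fun newCombos combo =>
            kv.2.foldl (fun newCombos val => newCombos ++ [pvDictSet combo kv.1 val]) newCombos)
          []) C
    = C.flatMap (fun c => (pvCart gs).map (fun r => r.foldl (fun d p => pvDictSet d p.1 p.2) c)) := by
  induction gs generalizing C with
  | nil => simp [pvCart]
  | cons g t ih =>
    obtain ⟨k, vs⟩ := g
    simp only [List.foldl_cons]
    rw [ih]
    have hstep : (C.foldl
        (fun newCombos combo =>
          vs.foldl (fun newCombos val => newCombos ++ [pvDictSet combo k val]) newCombos) [])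
        = C.flatMap (fun c => vs.map (fun v => pvDictSet c k v)) := by
      simp only [PySem.List.foldl_append_singleton_eq_map]
      simpa using PySem.List.foldl_append_eq_flatMap
        (l := C) (g := fun c => vs.map (fun v => pvDictSet c k v)) (acc := [])
    rw [hstep]
    simp [pvCart, List.flatMap_assoc, List.map_flatMap, List.flatMap_map, List.map_map,
      Function.comp_def, List.foldl_cons]

theorem pvBuild_eq_cart (gs : List (String × List Int))
    (h : (gs.map Prod.fst).Nodup) : pvBuild gs = pvCart gs := by
  induction gs with
  | nil => rfl
  | cons g t ih =>
    obtain ⟨k, vs⟩ := g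
    simp only [List.map_cons, List.nodup_cons] at h
    simp only [pvBuild, pvCart, ih h.2]
    congr 1
    funext v
    apply List.map_congr_left
    intro r hr
    rw [pvMerge_fresh r [(k, v)] (by rw [pvCart_keys t r hr]; exact h.2) ?_]
    · simp
    · intro x hx
      simp only [List.map_cons, List.map_nil, List.mem_singleton]
      rintro rfl
      rw [pvCart_keys t r hr] at hx
      exact h.1 hx

-- ===== VERDICT (by name: the statement is the Claim_ definition above) =====
theorem param_combinations_py_spec : Claim_equal_param_combinations_py := by
  intro grid _ hpre
  unfold Spec_param_combinations_py param_combinations_py param_combinations_py_alt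
  by_cases hg : grid = []
  · subst hg; rfl
  · rw [if_neg hg, pvA_loop, pvBuild_eq_cart grid hpre]
    have : [([] : List (String × Int))].flatMap
        (fun c => (pvCart grid).map (fun r => r.foldl (fun d p => pvDictSet d p.1 p.2) c))
        = (pvCart grid).map (fun r => r.foldl (fun d p => pvDictSet d p.1 p.2) []) := by
      simp
    rw [this]
    have hid : (pvCart grid).map (fun r => r.foldl (fun d p => pvDictSet d p.1 p.2) [])
        = (pvCart grid).map id := by
      apply List.map_congr_left
      intro r hr
      rw [pvMerge_fresh r [] (by rw [pvCart_keys grid r hr]; exact hpre) (by simp)]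
      simp
    rw [hid, List.map_id]
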